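-- pv_equiv track=rewrite | github.com/MdAbedin/binarysearch | 0917 Count Substrings With All 1s.py | solve
-- ===== SOURCE A (Python) =====
-- def solve(s):
--     MOD = 10**9+7
--     streak = 0
--     ans = 0
--     for c in s:
--         if c == "1": streak += 1
--         else: streak = 0
--         ans += streak
--         ans %= MOD
--     return ans
-- ===== SOURCE B (Python) =====
-- def solve(s):
--     MOD = 10**9 + 7
--     runs = "".join(c if c == "1" else "0" for c in s).split("0")
--     return sum(L * (L + 1) // 2 for L in map(len, runs)) % MOD
-- ===== Notes on version B (the rewrite author's own statement) =====
-- stated objective: alternative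
-- what changed: Replaces the per-character streak/mod accumulator with a run decomposition: normalize chars to '1'/'0', split on '0', and sum the triangular number L*(L+1)//2 of each run length, taking the modulus once at the end.
import Mathlib
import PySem

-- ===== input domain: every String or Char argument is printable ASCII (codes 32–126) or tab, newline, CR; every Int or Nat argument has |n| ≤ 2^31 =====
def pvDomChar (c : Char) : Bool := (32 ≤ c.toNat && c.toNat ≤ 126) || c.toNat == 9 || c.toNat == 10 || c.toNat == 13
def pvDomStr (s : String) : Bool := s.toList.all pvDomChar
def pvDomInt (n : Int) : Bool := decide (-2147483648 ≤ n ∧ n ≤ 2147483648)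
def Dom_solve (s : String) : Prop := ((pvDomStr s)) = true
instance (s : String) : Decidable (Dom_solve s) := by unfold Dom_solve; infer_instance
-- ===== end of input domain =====

-- B counts the all-'1' substrings by run decomposition (normalize to '1'/'0', split on '0',
-- triangular number per run, one modulus at the end) instead of A's per-character streak
-- accumulator with a modulus every step; same return value on every input.

-- ===== PORT A =====
def solve (s : String) : Int :=
  -- for c in s: if c == "1": streak += 1 else streak = 0; ans += streak; ans %= MOD
  (s.toList.foldl (fun (st : Int × Int) c =>
      let streak := if c = '1' then st.1 + 1 else 0
      (streak, PySem.Int.mod (st.2 + streak) (10 ^ 9 + 7))) (0, 0)).2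

-- ===== PORT B =====
def solve_alt (s : String) : Int :=
  -- "".join(c if c == "1" else "0" for c in s).split("0")
  let runs := ((s.toList.map (fun c => if c = '1' then '1' else '0')).splitOn '0')
  -- sum(L * (L + 1) // 2 for L in map(len, runs)) % MOD
  PySem.Int.mod
    ((runs.map (fun r =>
        PySem.Int.floordiv ((r.length : Int) * ((r.length : Int) + 1)) 2)).sum)
    (10 ^ 9 + 7)

-- ===== PRECONDITION & SPEC =====
def Spec_solve (s : String) (out : Int) : Prop := out = solve_alt s
instance (s : String) (out : Int) : Decidable (Spec_solve s out) := by unfold Spec_solve; infer_instance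

-- ===== CLAIM (what is proved, stated in full; the proofs are below) =====
def Claim_equal_solve : Prop := ∀ (s : String), Dom_solve s → Spec_solve s (solve s)

-- ===== LEMMAS AND PROOFS =====

-- the pure (un-modded) count of all-'1' substrings of cs, given a streak of k just before cs
def f (k : Nat) : List Char → Int
  | [] => 0
  | c :: cs => if c = '1' then ((k : Int) + 1) + f (k + 1) cs else f 0 cs

-- A's loop body, with the `let` inlined (definitionally equal to the lambda in `solve`)
def stepA (st : Int × Int) (c : Char) : Int × Int :=
  (if c = '1' then st.1 + 1 else 0,
   PySem.Int.mod (st.2 + (if c = '1' then st.1 + 1 else 0)) (10 ^ 9 + 7))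

-- A's fold computes (a + f k cs) % MOD: the per-step modulus keeps the answer reduced
theorem foldA (cs : List Char) (k : Nat) (a : Int) (ha : 0 ≤ a) (ha' : a < 10 ^ 9 + 7) :
    (cs.foldl stepA ((k : Int), a)).2 = (a + f k cs) % (10 ^ 9 + 7) := by
  have hb : a < 1000000007 := by norm_num at ha'; exact ha'
  induction cs generalizing k a with
  | nil =>
    simp only [List.foldl_nil, f, add_zero]
    omega
  | cons c cs ih =>
    rw [List.foldl_cons]
    by_cases hc : c = '1'
    · have hst : stepA ((k : Int), a) c = (((k+1 : Nat) : Int), (a + ((k+1:Nat):Int)) % (10^9+7)) := by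
        simp only [stepA, hc, if_pos, PySem.Int.mod]
        rw [Int.fmod_eq_emod_of_nonneg _ (by norm_num)]
        constructor <;> push_cast <;> ring_nf
      rw [hst, ih (k + 1) _ (Int.emod_nonneg _ (by norm_num)) (Int.emod_lt_of_pos _ (by norm_num))
            (by have := Int.emod_lt_of_pos (a + ((k+1:Nat):Int)) (b := 10^9+7) (by norm_num); norm_num at this ⊢; omega),
        Int.emod_add_emod]
      simp only [f, hc, if_pos]
      push_cast; ring_nf
    · have hst : stepA ((k : Int), a) c = (((0 : Nat) : Int), a) := by
        simp only [stepA, hc, ite_false, PySem.Int.mod, add_zero, Nat.cast_zero]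
        rw [Int.fmod_eq_emod_of_nonneg _ (by norm_num)]
        simp only [Prod.mk.injEq, true_and]
        omega
      rw [hst, ih 0 a ha ha' hb]
      simp [f, hc]

-- triangular number, as an Int
def triI (n : Nat) : Int := ((n * (n + 1) / 2 : Nat) : Int)

theorem triI_succ (n : Nat) : triI (n + 1) = triI n + (n + 1) := by
  unfold triI
  have h : (n + 1) * (n + 1 + 1) = n * (n + 1) + (n + 1) * 2 := by ring
  rw [h, Nat.add_mul_div_right _ _ (by norm_num : 0 < 2)]
  push_cast; ring

def norm1 (c : Char) : Char := if c = '1' then '1' else '0'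

-- run decomposition: f over cs = triangulars of the pieces of splitOnP '0' (head adjusted by k)
theorem f_splitOnP (cs : List Char) (k : Nat) :
    f k cs
      = triI (k + ((List.splitOnP (· == '0') (cs.map norm1)).headI).length) - triI k
        + (((List.splitOnP (· == '0') (cs.map norm1)).tail).map (fun r => triI r.length)).sum := by
  induction cs generalizing k with
  | nil => simp [f, List.splitOnP_nil]
  | cons c cs ih =>
    by_cases hc : c = '1'
    · simp only [List.map_cons, hc, norm1, if_pos, List.splitOnP_cons]
      have hb : (('1' : Char) == '0') = false := by decide
      obtain ⟨q, qs, hq⟩ := List.exists_cons_of_ne_nil (List.splitOnP_ne_nil (· == '0') (cs.map norm1))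
      simp only [hb, Bool.false_eq_true, if_false, hq, List.modifyHead_cons, List.headI_cons,
        List.tail_cons, List.length_cons]
      have hf : f k ('1' :: cs) = ((k : Int) + 1) + f (k + 1) cs := by simp [f]
      rw [hf, ih (k + 1), hq]
      simp only [List.headI_cons, List.tail_cons]
      have h1 : k + (q.length + 1) = (k + 1) + q.length := by omega
      rw [h1, triI_succ]
      push_cast; ring
    · simp only [List.map_cons, norm1, if_neg hc, List.splitOnP_cons]
      have hb : (('0' : Char) == '0') = true := by decide
      obtain ⟨q, qs, hq⟩ := List.exists_cons_of_ne_nil (List.splitOnP_ne_nil (· == '0') (cs.map norm1))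
      have hf : f k (c :: cs) = f 0 cs := by simp [f, hc]
      simp only [hb, if_true, List.headI_cons, List.tail_cons, List.length_nil, Nat.add_zero]
      rw [hf, ih 0, hq]
      simp only [List.headI_cons, List.tail_cons, List.map_cons, List.sum_cons]
      have h0 : triI 0 = 0 := by decide
      rw [h0, zero_add]
      ring_nf

theorem floordiv_tri (n : Nat) :
    PySem.Int.floordiv ((n : Int) * ((n : Int) + 1)) 2 = triI n := by
  unfold PySem.Int.floordiv triI
  rw [Int.fdiv_eq_ediv_of_nonneg _ (by norm_num)]
  push_cast [Int.natCast_div]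
  norm_num

theorem splitOn_eq (l : List Char) : l.splitOn '0' = List.splitOnP (· == '0') l := rfl

theorem solve_eq_alt (s : String) : solve s = solve_alt s := by
  unfold solve solve_alt
  have hA : (s.toList.foldl (fun (st : Int × Int) c =>
      let streak := if c = '1' then st.1 + 1 else 0
      (streak, PySem.Int.mod (st.2 + streak) (10 ^ 9 + 7))) (0, 0)).2
      = (s.toList.foldl stepA (((0:Nat) : Int), 0)).2 := rfl
  rw [hA, foldA s.toList 0 0 le_rfl (by norm_num)]
  simp only [splitOn_eq]
  obtain ⟨q, qs, hq⟩ := List.exists_cons_of_ne_nil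
    (List.splitOnP_ne_nil (· == '0') (s.toList.map (fun c => if c = '1' then '1' else '0')))
  have hnorm : (fun c => if c = '1' then '1' else '0') = norm1 := by funext c; rfl
  rw [hnorm] at hq ⊢
  rw [f_splitOnP s.toList 0, hq]
  simp only [List.headI_cons, List.tail_cons, List.map_cons, List.sum_cons, floordiv_tri]
  rw [PySem.Int.mod, Int.fmod_eq_emod_of_nonneg _ (by norm_num)]
  have h0 : triI 0 = 0 := by decide
  rw [h0]
  ring_nf

-- ===== VERDICT (by name: the statement is the Claim_ definition above) =====
theorem solve_spec : Claim_equal_solve := by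
  intro s _
  unfold Spec_solve
  exact solve_eq_alt s
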